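-- pv_equiv track=rewrite | github.com/ronang101/Renting-Prototype | algorithms/collaborative_filtering_web.py | aggregate_interactions
-- ===== SOURCE A (Python) =====
-- def aggregate_interactions(interactions, candidate_ids):
--     """
--     Aggregates interaction data to calculate a score for each candidate based
--     on likes and superlikes received from the target user. The purpose is to
--     find which candidates have been interacted with most in order to recommend
--     them to the user.
--
--     Args:
--
--     - interactions (list): A list of tuples containing interaction data
--       (user_id, interaction_type).
--     - candidate_ids (list): A list of candidate user IDs to aggregate
--       interactions for.
--
--     Returns:
--
--     - dict: A dictionary mapping candidate IDs to their aggregated interaction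
--       scores.
--     """
--
--     # Initialize a dictionary to keep track of the sum of interactions for
--     # each candidate.
--     interaction_sums = {candidate_id: 0 for candidate_id in candidate_ids}
--     # Loop through each interaction.
--     for user_id, interaction_type in interactions:
--         # If the interaction is a 'like' and the user is a candidate, increment
--         # their score by 1.
--         if interaction_type == 'liked' and user_id in interaction_sums:
--             interaction_sums[user_id] += 1
--             # If the interaction is a 'superlike' and the user is a candidate,
--             # increment their score by 2.
--         if interaction_type == 'superliked' and user_id in interaction_sums:
--             interaction_sums[user_id] += 2
--     # Return the dictionary of interaction sums.
--     return interaction_sums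
-- ===== SOURCE B (Python) =====
-- def aggregate_interactions(interactions, candidate_ids):
--     # Per-candidate counting: for each candidate, count its 'liked' and
--     # 'superliked' events directly; no accumulator dict over interactions.
--     return {cid: interactions.count((cid, 'liked'))
--                  + 2 * interactions.count((cid, 'superliked'))
--             for cid in candidate_ids}
-- ===== Notes on version B (the rewrite author's own statement) =====
-- stated objective: alternative
-- what changed: A folds over the interactions updating a pre-seeded per-candidate accumulator dict; B has no accumulator at all: for each candidate in order it counts the (cid,'liked') and (cid,'superliked') pairs with list.count, trading the single accumulation pass for per-candidate scans.
import Mathlib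
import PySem

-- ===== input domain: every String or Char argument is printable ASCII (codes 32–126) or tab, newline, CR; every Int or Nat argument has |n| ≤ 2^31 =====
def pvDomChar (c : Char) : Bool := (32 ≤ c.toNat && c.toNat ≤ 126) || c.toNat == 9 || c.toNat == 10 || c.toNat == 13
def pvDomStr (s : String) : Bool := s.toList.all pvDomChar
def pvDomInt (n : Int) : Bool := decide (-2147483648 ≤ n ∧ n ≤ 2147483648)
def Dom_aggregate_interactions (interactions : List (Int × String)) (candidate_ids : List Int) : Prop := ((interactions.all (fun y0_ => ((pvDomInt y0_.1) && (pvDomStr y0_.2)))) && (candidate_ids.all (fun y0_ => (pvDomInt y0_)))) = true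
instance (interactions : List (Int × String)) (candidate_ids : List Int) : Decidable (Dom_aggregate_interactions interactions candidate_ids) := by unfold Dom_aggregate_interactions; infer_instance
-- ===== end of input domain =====

-- B replaces A's accumulation pass over the interactions by direct per-candidate counting
-- with list.count (objective: alternative algorithm, same results).

-- ===== PORT A =====
-- Python dict -> PySem.Dict; the returned dict is its items list (insertion order).
def aggregate_interactions (interactions : List (Int × String)) (candidate_ids : List Int) : List (Int × Int) :=
  let interaction_sums : PySem.Dict Int Int :=
    candidate_ids.foldl (fun d c => d.insert c 0) PySem.Dict.empty
  let interaction_sums :=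
    interactions.foldl (fun d p =>
      let d := if p.2 == "liked" && d.contains p.1 then d.modify p.1 0 (· + 1) else d
      if p.2 == "superliked" && d.contains p.1 then d.modify p.1 0 (· + 2) else d)
      interaction_sums
  interaction_sums.items

-- ===== PORT B =====
-- dict comprehension over candidate_ids; list.count -> PySem.List.count
def aggregate_interactions_alt (interactions : List (Int × String)) (candidate_ids : List Int) : List (Int × Int) :=
  (candidate_ids.foldl (fun d c =>
      d.insert c ((PySem.List.count interactions (c, "liked") : Int)
                  + 2 * (PySem.List.count interactions (c, "superliked") : Int)))
    PySem.Dict.empty).items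

-- ===== PRECONDITION & SPEC =====
def Spec_aggregate_interactions (interactions : List (Int × String)) (candidate_ids : List Int) (out : List (Int × Int)) : Prop := out = aggregate_interactions_alt interactions candidate_ids
instance (interactions : List (Int × String)) (candidate_ids : List Int) (out : List (Int × Int)) : Decidable (Spec_aggregate_interactions interactions candidate_ids out) := by unfold Spec_aggregate_interactions; infer_instance

-- ===== CLAIM (what is proved, stated in full; the proofs are below) =====
def Claim_equal_aggregate_interactions : Prop := ∀ (interactions : List (Int × String)) (candidate_ids : List Int), Dom_aggregate_interactions interactions candidate_ids → Spec_aggregate_interactions interactions candidate_ids (aggregate_interactions interactions candidate_ids)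

-- ===== LEMMAS AND PROOFS =====

-- combined like/superlike weight of one interaction type
def pvW (t : String) : Int := if t = "liked" then 1 else if t = "superliked" then 2 else 0

-- total weighted score user k receives from a list of interactions
def pvScore (l : List (Int × String)) (k : Int) : Int :=
  (l.map (fun p => if p.1 = k then pvW p.2 else 0)).sum

-- A's per-interaction step
def pvStepA (d : PySem.Dict Int Int) (p : Int × String) : PySem.Dict Int Int :=
  let d := if p.2 == "liked" && d.contains p.1 then d.modify p.1 0 (· + 1) else d
  if p.2 == "superliked" && d.contains p.1 then d.modify p.1 0 (· + 2) else d

theorem pv_keys_step (d : PySem.Dict Int Int) (b : Bool) (k : Int) (f : Int → Int)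
    (hb : b = true → d.contains k = true) :
    (if b then d.modify k 0 f else d).keys = d.keys := by
  cases b with
  | true => rw [if_pos rfl, PySem.Dict.keys_modify, PySem.Dict.keys_insert_of_contains _ _ (hb rfl)]
  | false => rfl

theorem pv_getD_step (d : PySem.Dict Int Int) (b : Bool) (j k : Int) (f : Int → Int) :
    (if b then d.modify j 0 f else d).getD k 0
      = if b = true ∧ j = k then f (d.getD j 0) else d.getD k 0 := by
  cases b with
  | true =>
    rw [if_pos rfl, PySem.Dict.getD_modify]
    by_cases hjk : j = k
    · subst hjk; simp
    · rw [if_neg (fun h : k = j => hjk h.symm), if_neg (fun h : true = true ∧ j = k => hjk h.2)]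
  | false => simp

theorem pvStepA_keys (d : PySem.Dict Int Int) (p : Int × String) : (pvStepA d p).keys = d.keys := by
  unfold pvStepA
  rw [pv_keys_step _ _ _ _ (fun h => (Bool.and_eq_true _ _ ▸ h).2),
      pv_keys_step _ _ _ _ (fun h => (Bool.and_eq_true _ _ ▸ h).2)]

theorem pvStepA_contains (d : PySem.Dict Int Int) (p : Int × String) (k : Int) :
    (pvStepA d p).contains k = d.contains k := by
  rw [PySem.Dict.contains_eq_decide_mem_keys, PySem.Dict.contains_eq_decide_mem_keys, pvStepA_keys]

theorem pvStepA_getD (d : PySem.Dict Int Int) (p : Int × String) (k : Int)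
    (hk : d.contains k = true) :
    (pvStepA d p).getD k 0 = d.getD k 0 + (if p.1 = k then pvW p.2 else 0) := by
  unfold pvStepA
  set d1 := if p.2 == "liked" && d.contains p.1 then d.modify p.1 0 (· + 1) else d with hd1
  have hc1 : d1.contains p.1 = d.contains p.1 := by
    rw [hd1]
    cases hb : (p.2 == "liked" && d.contains p.1) with
    | true =>
      rw [if_pos rfl, PySem.Dict.contains_modify]
      simp [(Bool.and_eq_true _ _ ▸ hb).2]
    | false => simp
  have hg1 := pv_getD_step d (p.2 == "liked" && d.contains p.1) p.1 k (· + 1)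
  have hg2 := pv_getD_step d1 (p.2 == "superliked" && d1.contains p.1) p.1 k (· + 2)
  rw [← hd1] at hg1
  rw [hg2, hc1, hg1]
  by_cases hpk : p.1 = k
  · subst hpk
    by_cases hl : p.2 = "liked"
    · simp [hl, hk, pvW]
    · by_cases hs : p.2 = "superliked" <;> simp [hg1, hl, hs, hk, pvW]
  · simp [hpk]

theorem pvFoldA_keys (l : List (Int × String)) (d : PySem.Dict Int Int) :
    (l.foldl pvStepA d).keys = d.keys := by
  induction l generalizing d with
  | nil => rfl
  | cons p t ih => rw [List.foldl_cons, ih, pvStepA_keys]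

theorem pvFoldA_getD (l : List (Int × String)) (d : PySem.Dict Int Int) (k : Int)
    (hk : d.contains k = true) :
    (l.foldl pvStepA d).getD k 0 = d.getD k 0 + pvScore l k := by
  induction l generalizing d with
  | nil => simp [pvScore]
  | cons p t ih =>
    rw [List.foldl_cons, ih _ (by rw [pvStepA_contains]; exact hk), pvStepA_getD _ _ _ hk]
    simp [pvScore, add_assoc]

-- B's per-candidate count equals the weighted score
theorem pvScore_eq_count (l : List (Int × String)) (k : Int) :
    pvScore l k = (PySem.List.count l (k, "liked") : Int)
                  + 2 * (PySem.List.count l (k, "superliked") : Int) := by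
  induction l with
  | nil => simp [pvScore, PySem.List.count_eq]
  | cons p t ih =>
    obtain ⟨a, s⟩ := p
    simp only [pvScore, List.map_cons, List.sum_cons] at ih ⊢
    rw [ih]
    simp only [PySem.List.count_eq, List.count_cons]
    by_cases ha : a = k
    · subst ha
      by_cases hl : s = "liked"
      · subst hl; simp [pvW]; ring
      · by_cases hs : s = "superliked"
        · subst hs; simp [pvW, hl]; ring
        · simp [pvW, hl, hs, Prod.ext_iff]
    · simp [ha, Prod.ext_iff]

theorem pvInit_getD (l : List Int) (d : PySem.Dict Int Int) (h : ∀ k, d.getD k 0 = 0) (k : Int) :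
    (l.foldl (fun d c => d.insert c 0) d).getD k 0 = 0 := by
  induction l generalizing d with
  | nil => exact h k
  | cons c t ih =>
    rw [List.foldl_cons]
    exact ih _ (fun k' => by rw [PySem.Dict.getD_insert]; split <;> simp [h])

theorem pvProj_getD (f : Int → Int) (l : List Int) (d : PySem.Dict Int Int)
    (h : ∀ k, d.contains k = true → d.getD k 0 = f k) (k : Int)
    (hk : (l.foldl (fun d c => d.insert c (f c)) d).contains k = true) :
    (l.foldl (fun d c => d.insert c (f c)) d).getD k 0 = f k := by
  induction l generalizing d with
  | nil => exact h k hk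
  | cons c t ih =>
    rw [List.foldl_cons] at hk ⊢
    refine ih _ (fun k' hk' => ?_) hk
    rw [PySem.Dict.getD_insert]
    by_cases hkc : k' = c
    · rw [if_pos hkc, hkc]
    · rw [if_neg hkc]
      exact h k' (by simpa [PySem.Dict.contains_insert, hkc] using hk')

-- ===== VERDICT (by name: the statement is the Claim_ definition above) =====
theorem aggregate_interactions_spec : Claim_equal_aggregate_interactions := by
  intro interactions candidate_ids _
  unfold Spec_aggregate_interactions aggregate_interactions aggregate_interactions_alt
  set f : Int → Int := fun c => (PySem.List.count interactions (c, "liked") : Int)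
      + 2 * (PySem.List.count interactions (c, "superliked") : Int) with hf
  show (interactions.foldl pvStepA
      (candidate_ids.foldl (fun d c => d.insert c 0) PySem.Dict.empty)).items
    = (candidate_ids.foldl (fun d c => d.insert c (f c)) PySem.Dict.empty).items
  set init : PySem.Dict Int Int := candidate_ids.foldl (fun d c => d.insert c 0) PySem.Dict.empty with hinit
  have hkeysInit : init.keys = PySem.Set.ofList candidate_ids := by
    rw [hinit, PySem.Dict.keys_foldl_insert]
    simp [PySem.Set.update_nil_left]
  have hkeysA : (interactions.foldl pvStepA init).keys = PySem.Set.ofList candidate_ids := by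
    rw [pvFoldA_keys, hkeysInit]
  have hkeysB : (candidate_ids.foldl (fun d c => d.insert c (f c)) PySem.Dict.empty).keys
      = PySem.Set.ofList candidate_ids := by
    rw [PySem.Dict.keys_foldl_insert]
    simp [PySem.Set.update_nil_left]
  have hnodup : (PySem.Set.ofList candidate_ids : List Int).Nodup := PySem.Set.nodup_ofList _
  rw [PySem.Dict.items_eq_map_keys _ (by rw [hkeysA]; exact hnodup) 0,
      PySem.Dict.items_eq_map_keys _ (by rw [hkeysB]; exact hnodup) 0, hkeysA, hkeysB]
  refine List.map_congr_left (fun k hk => ?_)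
  have hcInit : init.contains k = true := by
    rw [PySem.Dict.contains_eq_decide_mem_keys, hkeysInit]; simpa using hk
  have hA : (interactions.foldl pvStepA init).getD k 0 = pvScore interactions k := by
    rw [pvFoldA_getD _ _ _ hcInit, hinit, pvInit_getD _ _ (fun k' => PySem.Dict.getD_empty k' 0), zero_add]
  have hB : (candidate_ids.foldl (fun d c => d.insert c (f c)) PySem.Dict.empty).getD k 0
      = pvScore interactions k := by
    have hcB : (candidate_ids.foldl (fun d c => d.insert c (f c)) PySem.Dict.empty).contains k = true := by
      rw [PySem.Dict.contains_eq_decide_mem_keys, hkeysB]; simpa using hk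
    rw [pvProj_getD f _ _ (fun k' h => absurd h (by simp)) _ hcB, hf, pvScore_eq_count]
  rw [hA, hB]
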